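-- pv_equiv track=rewrite | github.com/tobgbems/jobhunch | scripts/scrape_jobs.py | dedupe_by_apply_url
-- ===== SOURCE A (Python) =====
-- from typing import Any
--
-- def dedupe_by_apply_url(rows: list[dict[str, Any]]) -> list[dict[str, Any]]:
--     by_url: dict[str, dict[str, Any]] = {}
--     for r in rows:
--         u = r.get("apply_url")
--         if not u:
--             continue
--         by_url[u] = r
--     return list(by_url.values())
-- ===== SOURCE B (Python) =====
-- def dedupe_by_apply_url(rows):
--     # pass 1 (reverse order): remember, for each url, the LAST row that carries it,
--     # by keeping the FIRST row seen while walking backwards (never overwriting)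
--     last = {}
--     for r in reversed(rows):
--         u = r.get("apply_url")
--         if u and u not in last:
--             last[u] = r
--     # pass 2 (forward order): emit each url's remembered row at its first occurrence,
--     # popping it so later occurrences are skipped
--     out = []
--     for r in rows:
--         u = r.get("apply_url")
--         if u in last:
--             out.append(last.pop(u))
--     return out
-- ===== Notes on version B (the rewrite author's own statement) =====
-- stated objective: alternative
-- what changed: Replaces A's single forward pass with dict value-overwrite (last write wins) plus dict.values() by two staged passes: a backward pass that records each url's last row by never overwriting (first seen while walking in reverse), then a forward pass that emits and pops each url's remembered row at its first occurrence.
import Mathlib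
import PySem

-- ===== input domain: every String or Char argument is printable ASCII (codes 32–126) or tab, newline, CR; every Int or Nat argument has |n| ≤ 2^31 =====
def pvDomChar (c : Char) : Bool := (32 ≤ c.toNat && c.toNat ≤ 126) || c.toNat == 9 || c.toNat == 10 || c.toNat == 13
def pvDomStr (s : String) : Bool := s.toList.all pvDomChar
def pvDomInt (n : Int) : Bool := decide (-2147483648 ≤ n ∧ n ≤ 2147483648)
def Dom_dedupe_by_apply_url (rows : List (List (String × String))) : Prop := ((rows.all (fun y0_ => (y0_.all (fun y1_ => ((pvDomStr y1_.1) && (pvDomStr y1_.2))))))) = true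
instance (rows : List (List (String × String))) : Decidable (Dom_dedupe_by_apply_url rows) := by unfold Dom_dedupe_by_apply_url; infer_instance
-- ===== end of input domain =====

-- B replaces A's forward overwrite-dict + dict.values() by two staged passes: a backward
-- keep-first pass recording each url's last row, then a forward emit-and-pop pass (objective: alternative).


-- ===== PORT A =====
-- r.get("apply_url"): first match in the row's association list
def pvRowGet (r : List (String × String)) : Option String :=
  (PySem.Dict.mk r).get? "apply_url"

-- loop body of A: by_url[u] = r unless u is missing or falsy ("")
def pvStepA (d : PySem.Dict String (List (String × String))) (r : List (String × String)) :
    PySem.Dict String (List (String × String)) :=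
  match pvRowGet r with
  | none => d
  | some u => if u = "" then d else d.insert u r

def dedupe_by_apply_url (rows : List (List (String × String))) : List (List (String × String)) :=
  (rows.foldl pvStepA PySem.Dict.empty).values

-- ===== PORT B =====
-- pass-1 body (over reversed rows): last[u] = r only if u truthy and u not already in last
def pvKeep (d : PySem.Dict String (List (String × String))) (r : List (String × String)) :
    PySem.Dict String (List (String × String)) :=
  match pvRowGet r with
  | none => d
  | some u => if u = "" then d else if d.contains u then d else d.insert u r

-- pass-2 body: if u in last: out.append(last.pop(u))  (pop = read + erase)
def pvEmit (st : PySem.Dict String (List (String × String)) × List (List (String × String)))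
    (r : List (String × String)) :
    PySem.Dict String (List (String × String)) × List (List (String × String)) :=
  match pvRowGet r with
  | none => st
  | some u =>
    match st.1.get? u with
    | some x => (st.1.erase u, st.2 ++ [x])
    | none => st

def dedupe_by_apply_url_alt (rows : List (List (String × String))) : List (List (String × String)) :=
  (rows.foldl pvEmit (rows.reverse.foldl pvKeep PySem.Dict.empty, [])).2

-- ===== PRECONDITION & SPEC =====
def Spec_dedupe_by_apply_url (rows : List (List (String × String))) (out : List (List (String × String))) : Prop := out = dedupe_by_apply_url_alt rows
instance (rows : List (List (String × String))) (out : List (List (String × String))) : Decidable (Spec_dedupe_by_apply_url rows out) := by unfold Spec_dedupe_by_apply_url; infer_instance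

-- ===== CLAIM (what is proved, stated in full; the proofs are below) =====
def Claim_equal_dedupe_by_apply_url : Prop := ∀ (rows : List (List (String × String))), Dom_dedupe_by_apply_url rows → Spec_dedupe_by_apply_url rows (dedupe_by_apply_url rows)

-- ===== LEMMAS AND PROOFS =====

-- the truthy url of a row, if any
def pvUrlOf (r : List (String × String)) : Option String :=
  match pvRowGet r with
  | none => none
  | some u => if u = "" then none else some u

-- the truthy urls of a row list, in order
def pvUrls (rows : List (List (String × String))) : List String := rows.filterMap pvUrlOf

-- keep-first deduplication, filter form
def pvDedup : List String → List String
  | [] => []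
  | u :: t => u :: pvDedup (t.filter (fun v => decide (¬ v = u)))
termination_by l => l.length
decreasing_by
  simp only [List.length_cons, List.length_unattach]
  exact Nat.lt_succ_of_le (le_trans (List.length_filter_le _ t.attach) (by simp))

-- the last row of rows carrying url u (default [] when absent)
def pvLast? (rows : List (List (String × String))) (u : String) : Option (List (String × String)) :=
  rows.reverse.find? (fun r => pvUrlOf r == some u)

def pvGetL (rows : List (List (String × String))) (u : String) : List (String × String) :=
  (pvLast? rows u).getD []

-- the emit pass as a standalone recursion on the rows
def pvEmitAll (l : List (List (String × String))) (d : PySem.Dict String (List (String × String))) :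
    List (List (String × String)) :=
  match l with
  | [] => []
  | r :: t =>
    match pvUrlOf r with
    | none => pvEmitAll t d
    | some u =>
      match d.get? u with
      | some x => x :: pvEmitAll t (d.erase u)
      | none => pvEmitAll t d

-- bridges: the three loop bodies, restated through pvUrlOf
lemma pvStepA_none {d r} (h : pvUrlOf r = none) : pvStepA d r = d := by
  unfold pvUrlOf at h; unfold pvStepA
  cases hg : pvRowGet r with
  | none => rfl
  | some u => rw [hg] at h; by_cases hu : u = "" <;> simp_all

lemma pvStepA_some {d r u} (h : pvUrlOf r = some u) : pvStepA d r = d.insert u r := by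
  unfold pvUrlOf at h; unfold pvStepA
  cases hg : pvRowGet r with
  | none => rw [hg] at h; simp at h
  | some v => rw [hg] at h; by_cases hu : v = "" <;> simp_all

lemma pvKeep_none {d r} (h : pvUrlOf r = none) : pvKeep d r = d := by
  unfold pvUrlOf at h; unfold pvKeep
  cases hg : pvRowGet r with
  | none => rfl
  | some u => rw [hg] at h; by_cases hu : u = "" <;> simp_all

lemma pvKeep_some {d r u} (h : pvUrlOf r = some u) :
    pvKeep d r = if d.contains u then d else d.insert u r := by
  unfold pvUrlOf at h; unfold pvKeep
  cases hg : pvRowGet r with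
  | none => rw [hg] at h; simp at h
  | some v => rw [hg] at h; by_cases hu : v = "" <;> simp_all

-- a truthy url is never ""
lemma pvUrlOf_ne_empty (r : List (String × String)) : pvUrlOf r ≠ some "" := by
  unfold pvUrlOf
  cases pvRowGet r with
  | none => simp
  | some u => by_cases hu : u = "" <;> simp [hu]

-- with "" absent from the dict, pvEmit is driven by pvUrlOf
lemma pvEmit_eq {st r} (h : st.1.get? "" = none) :
    pvEmit st r = match pvUrlOf r with
      | none => st
      | some u => match st.1.get? u with | some x => (st.1.erase u, st.2 ++ [x]) | none => st := by
  unfold pvEmit pvUrlOf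
  cases hg : pvRowGet r with
  | none => rfl
  | some u => by_cases hu : u = "" <;> simp_all

-- erase lemmas
lemma pvFind_filter (l : List (String × List (String × String))) (u v : String) :
    (l.filter (fun p => !(p.1 == u))).find? (fun p => p.1 == v)
      = if v = u then none else l.find? (fun p => p.1 == v) := by
  induction l with
  | nil => simp
  | cons p t ih =>
    by_cases hpu : p.1 = u
    · rw [List.filter_cons_of_neg (by simp [hpu]), ih]
      by_cases hv : v = u
      · simp [hv]
      · rw [if_neg hv, if_neg hv,
          List.find?_cons_of_neg (by simp [hpu]; exact fun h => hv h.symm)]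
    · rw [List.filter_cons_of_pos (by simp [hpu])]
      by_cases hpv : p.1 = v
      · rw [List.find?_cons_of_pos (by simp [hpv]), List.find?_cons_of_pos (by simp [hpv]),
          if_neg (by rintro rfl; exact hpu hpv)]
      · rw [List.find?_cons_of_neg (by simp [hpv]), List.find?_cons_of_neg (by simp [hpv]), ih]

lemma pvGet?_erase (d : PySem.Dict String (List (String × String))) (u v : String) :
    (d.erase u).get? v = if v = u then none else d.get? v := by
  show ((d.items.filter (fun p => !(p.1 == u))).find? (fun p => p.1 == v)).map (·.2)
      = if v = u then none else (d.items.find? (fun p => p.1 == v)).map (·.2)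
  rw [pvFind_filter]
  split <;> rfl

lemma pvContains_erase (d : PySem.Dict String (List (String × String))) (u v : String) :
    (d.erase u).contains v = if v = u then false else d.contains v := by
  rw [PySem.Dict.contains_eq_isSome_get?, pvGet?_erase]
  split
  · rfl
  · rw [PySem.Dict.contains_eq_isSome_get?]

-- normalising the attach/unattach artefacts of pvDedup's functional induction
lemma pvUnattach (t : List String) (u : String) :
    (List.filter (fun (x : {x // x ∈ t}) => decide (¬ x.1 = u)) t.attach).unattach
      = t.filter (fun v => decide (¬ v = u)) := by
  rw [List.unattach_filter (g := fun v => decide (¬ v = u)) (hf := fun x h => rfl),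
    List.unattach_attach]

-- pvDedup facts
lemma pvMem_dedup (xs : List String) (v : String) : v ∈ pvDedup xs ↔ v ∈ xs := by
  induction xs using pvDedup.induct with
  | case1 => simp [pvDedup]
  | case2 u t ih =>
    simp only [pvUnattach] at ih
    rw [pvDedup]
    simp only [List.mem_cons, ih, List.mem_filter]
    by_cases hv : v = u <;> simp [hv]

lemma pvDedup_append (xs : List String) (u : String) :
    pvDedup (xs ++ [u]) = if u ∈ xs then pvDedup xs else pvDedup xs ++ [u] := by
  induction xs using pvDedup.induct with
  | case1 => simp [pvDedup]
  | case2 x t ih =>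
    simp only [pvUnattach] at ih
    rw [List.cons_append, pvDedup, List.filter_append]
    by_cases hux : u = x
    · rw [List.filter_cons_of_neg (by simp [hux]), List.filter_nil, List.append_nil,
        if_pos (by simp [hux]), pvDedup]
    · rw [List.filter_cons_of_pos (by simp [hux]), List.filter_nil, ih]
      by_cases hut : u ∈ t
      · rw [if_pos (by simp [List.mem_filter, hut, hux]), if_pos (by simp [hut]), pvDedup]
      · rw [if_neg (by simp [List.mem_filter, hut]), if_neg (by simp [hut, hux]), pvDedup,
          List.cons_append]

-- pvLast? / pvGetL under appending a row
lemma pvLast?_append (rows : List (List (String × String))) (r : List (String × String)) (v : String) :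
    pvLast? (rows ++ [r]) v = if pvUrlOf r == some v then some r else pvLast? rows v := by
  unfold pvLast?
  rw [List.reverse_append, List.reverse_singleton, List.singleton_append, List.find?_cons]
  split <;> simp_all

lemma pvGetL_append_none {rows r} (h : pvUrlOf r = none) (v : String) :
    pvGetL (rows ++ [r]) v = pvGetL rows v := by
  rw [pvGetL, pvLast?_append, h]
  simp [pvGetL]

lemma pvGetL_append_some {rows r u} (h : pvUrlOf r = some u) (v : String) :
    pvGetL (rows ++ [r]) v = if v = u then r else pvGetL rows v := by
  rw [pvGetL, pvLast?_append, h]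
  by_cases hv : v = u
  · simp [hv]
  · rw [if_neg (by simp; exact fun h => hv h.symm), if_neg hv, pvGetL]

-- A's dict, characterised: items = deduped urls paired with their last rows
lemma pvAItems (rows : List (List (String × String))) :
    (rows.foldl pvStepA PySem.Dict.empty).items
      = (pvDedup (pvUrls rows)).map (fun u => (u, pvGetL rows u)) := by
  induction rows using List.reverseRecOn with
  | nil => simp [pvUrls, pvDedup, PySem.Dict.empty]
  | append_singleton rows r ih =>
    rw [List.foldl_append, List.foldl_cons, List.foldl_nil]
    have hkeys : (rows.foldl pvStepA PySem.Dict.empty).keys = pvDedup (pvUrls rows) := by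
      show (rows.foldl pvStepA PySem.Dict.empty).items.map Prod.fst = _
      rw [ih, List.map_map]
      rw [show (Prod.fst ∘ fun u => (u, pvGetL rows u)) = id from rfl, List.map_id]
    have hurls : pvUrls (rows ++ [r]) = pvUrls rows ++ (pvUrlOf r).toList := by
      cases hr : pvUrlOf r <;> simp [pvUrls, hr]
    cases hu : pvUrlOf r with
    | none =>
      rw [pvStepA_none hu, ih, hurls, hu, Option.toList_none, List.append_nil]
      exact List.map_congr_left fun v _ => by rw [pvGetL_append_none hu]
    | some u =>
      rw [pvStepA_some hu, hurls, hu, Option.toList_some]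
      by_cases hm : u ∈ pvUrls rows
      · have hc : (rows.foldl pvStepA PySem.Dict.empty).contains u = true := by
          rw [PySem.Dict.contains_iff_mem_keys] at *
          rw [hkeys, pvMem_dedup]; exact hm
        rw [PySem.Dict.items_insert_of_contains _ _ hc, ih, List.map_map,
          pvDedup_append, if_pos hm]
        refine List.map_congr_left fun v hv => ?_
        by_cases hvu : v = u
        · simp [Function.comp, hvu, pvGetL_append_some hu]
        · simp [Function.comp, hvu, pvGetL_append_some hu]
      · have hc : (rows.foldl pvStepA PySem.Dict.empty).contains u = false := by
          rw [Bool.eq_false_iff, Ne, PySem.Dict.contains_iff_mem_keys, hkeys, pvMem_dedup]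
          exact hm
        rw [PySem.Dict.items_insert_of_not_contains _ _ hc, ih,
          pvDedup_append, if_neg hm, List.map_append, List.map_singleton]
        congr 1
        · refine List.map_congr_left fun v hv => ?_
          have hvu : v ≠ u := fun h => hm (h ▸ (pvMem_dedup _ _).mp hv)
          rw [pvGetL_append_some hu, if_neg hvu]
        · rw [pvGetL_append_some hu, if_pos rfl]

-- B pass 1, characterised: a keep-first fold looks up as "init, else first hit"
lemma pvKeepFold_get? (l : List (List (String × String)))
    (d : PySem.Dict String (List (String × String))) (v : String) :
    (l.foldl pvKeep d).get? v = (d.get? v).or (l.find? (fun r => pvUrlOf r == some v)) := by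
  induction l generalizing d with
  | nil => simp
  | cons r t ih =>
    rw [List.foldl_cons]
    cases hu : pvUrlOf r with
    | none =>
      rw [pvKeep_none hu, ih, List.find?_cons_of_neg (by simp [hu])]
    | some u =>
      by_cases hc : d.contains u
      · rw [pvKeep_some hu, if_pos hc, ih]
        by_cases hv : v = u
        · subst hv
          obtain ⟨w, hw⟩ : ∃ w, d.get? v = some w := by
            have := hc
            rw [PySem.Dict.contains_eq_isSome_get?] at this
            exact Option.isSome_iff_exists.mp this
          rw [hw, List.find?_cons_of_pos (by simp [hu]), Option.some_or, Option.some_or]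
        · rw [List.find?_cons_of_neg (by simp [hu]; exact fun h => hv h.symm)]
      · rw [pvKeep_some hu, if_neg hc, ih, PySem.Dict.get?_insert]
        by_cases hv : v = u
        · subst hv
          have hnone : d.get? v = none := by
            rw [PySem.Dict.contains_eq_isSome_get?] at hc
            exact Option.not_isSome_iff_eq_none.mp hc
          rw [if_pos rfl, hnone, List.find?_cons_of_pos (by simp [hu]), Option.some_or,
            Option.none_or]
        · rw [if_neg hv, List.find?_cons_of_neg (by simp [hu]; exact fun h => hv h.symm)]

-- B pass 2 as pvEmitAll
lemma pvEmitFold (l : List (List (String × String)))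
    (d : PySem.Dict String (List (String × String))) (out : List (List (String × String)))
    (h : d.get? "" = none) :
    (l.foldl pvEmit (d, out)).2 = out ++ pvEmitAll l d := by
  induction l generalizing d out with
  | nil => simp [pvEmitAll]
  | cons r t ih =>
    have he := pvEmit_eq (st := (d, out)) (r := r) h
    rw [List.foldl_cons]
    cases hu : pvUrlOf r with
    | none =>
      simp only [hu] at he
      rw [he, ih d out h]
      simp only [pvEmitAll, hu]
    | some u =>
      cases hg : d.get? u with
      | none =>
        simp [hu, hg] at he
        rw [he, ih d out h]
        simp only [pvEmitAll, hu, hg]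
      | some x =>
        have hu0 : u ≠ "" := fun h0 => pvUrlOf_ne_empty r (h0 ▸ hu)
        have h' : (d.erase u).get? "" = none := by
          rw [pvGet?_erase, if_neg (Ne.symm hu0)]; exact h
        simp [hu, hg] at he
        rw [he, ih (d.erase u) (out ++ [x]) h']
        simp only [pvEmitAll, hu, hg]
        rw [List.append_assoc, List.singleton_append]

-- pvEmitAll, characterised
lemma pvEmitAll_char (l : List (List (String × String)))
    (d : PySem.Dict String (List (String × String))) :
    pvEmitAll l d
      = (pvDedup ((pvUrls l).filter (fun u => d.contains u))).map (fun u => (d.get? u).getD []) := by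
  induction l generalizing d with
  | nil => simp [pvEmitAll, pvUrls, pvDedup]
  | cons r t ih =>
    rw [pvEmitAll]
    cases hu : pvUrlOf r with
    | none =>
      rw [ih d]
      simp [pvUrls, hu]
    | some u =>
      have hurls : pvUrls (r :: t) = u :: pvUrls t := by simp [pvUrls, hu]
      cases hg : d.get? u with
      | none =>
        have hc : d.contains u = false := by
          rw [PySem.Dict.contains_eq_isSome_get?, hg]; rfl
        simp only [hg]
        rw [ih d, hurls, List.filter_cons_of_neg (by simp [hc])]
      | some x =>
        have hc : d.contains u = true := by
          rw [PySem.Dict.contains_eq_isSome_get?, hg]; rfl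
        simp only [hg]
        rw [hurls, List.filter_cons_of_pos (by simp [hc]), pvDedup, List.map_cons, hg,
          Option.getD_some, ih (d.erase u)]
        congr 1
        have hfilt : (pvUrls t).filter (fun v => (d.erase u).contains v)
            = ((pvUrls t).filter (fun v => d.contains v)).filter (fun v => decide (¬ v = u)) := by
          rw [List.filter_filter]
          refine List.filter_congr fun v _ => ?_
          rw [pvContains_erase]
          by_cases hv : v = u <;> simp [hv, hc]
        rw [hfilt]
        refine List.map_congr_left fun v hv => ?_
        have hvu : v ≠ u := by
          have := (pvMem_dedup _ _).mp hv
          rw [List.mem_filter] at this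
          simpa using this.2
        rw [pvGet?_erase, if_neg hvu]

-- every truthy url of rows has a last row
lemma pvLast?_isSome {rows u} (h : u ∈ pvUrls rows) : (pvLast? rows u).isSome := by
  rw [pvUrls, List.mem_filterMap] at h
  obtain ⟨r, hr, hru⟩ := h
  rw [pvLast?, List.find?_isSome]
  exact ⟨r, List.mem_reverse.mpr hr, by simp [hru]⟩

-- ===== VERDICT (by name: the statement is the Claim_ definition above) =====
theorem dedupe_by_apply_url_spec : Claim_equal_dedupe_by_apply_url := by
  intro rows _
  show dedupe_by_apply_url rows = dedupe_by_apply_url_alt rows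
  have hget : ∀ v, (rows.reverse.foldl pvKeep PySem.Dict.empty).get? v = pvLast? rows v := by
    intro v
    rw [pvKeepFold_get?, PySem.Dict.get?_empty, Option.none_or, pvLast?]
  have hempty : (rows.reverse.foldl pvKeep PySem.Dict.empty).get? "" = none := by
    rw [hget, pvLast?, List.find?_eq_none]
    intro r _
    simpa using pvUrlOf_ne_empty r
  have hB : dedupe_by_apply_url_alt rows
      = pvEmitAll rows (rows.reverse.foldl pvKeep PySem.Dict.empty) := by
    show (rows.foldl pvEmit (rows.reverse.foldl pvKeep PySem.Dict.empty, [])).2 = _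
    rw [pvEmitFold _ _ _ hempty, List.nil_append]
  have hfilt : (pvUrls rows).filter
      (fun u => (rows.reverse.foldl pvKeep PySem.Dict.empty).contains u) = pvUrls rows := by
    refine List.filter_eq_self.mpr fun u hu => ?_
    rw [PySem.Dict.contains_eq_isSome_get?, hget]
    exact pvLast?_isSome hu
  rw [hB, pvEmitAll_char, hfilt]
  show (rows.foldl pvStepA PySem.Dict.empty).items.map Prod.snd = _
  rw [pvAItems, List.map_map]
  refine List.map_congr_left fun v _ => ?_
  show pvGetL rows v = ((rows.reverse.foldl pvKeep PySem.Dict.empty).get? v).getD []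
  rw [hget, pvGetL]
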